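-- pv_equiv track=rewrite | github.com/Jianye-Jin/gaming-your-life | src/fate_app/app.py | parse_weekly_days
-- ===== SOURCE A (Python) =====
-- def parse_weekly_days(raw: str | None) -> list[int]:
--     if not raw:
--         return []
--     parts = [part.strip() for part in raw.split(",") if part.strip()]
--     days = []
--     for part in parts:
--         try:
--             day_idx = int(part)
--         except ValueError:
--             continue
--         if 0 <= day_idx <= 6:
--             days.append(day_idx)
--     return sorted(set(days))
-- ===== SOURCE B (Python) =====
-- def _parses_to(tok: str, d: int) -> bool:
--     try:
--         return int(tok.strip()) == d
--     except ValueError: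
--         return False
--
--
-- def parse_weekly_days(raw: str | None) -> list[int]:
--     if not raw:
--         return []
--     tokens = raw.split(",")
--     return [d for d in range(7) if any(_parses_to(tok, d) for tok in tokens)]
-- ===== Notes on version B (the rewrite author's own statement) =====
-- stated objective: alternative
-- what changed: B inverts the loop structure: instead of accumulating parsed days and returning sorted(set(days)), it iterates the fixed weekday domain range(7) in order and for each candidate searches the comma tokens for one that parses to it, so no accumulator, no set and no sort exist.
import Mathlib
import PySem

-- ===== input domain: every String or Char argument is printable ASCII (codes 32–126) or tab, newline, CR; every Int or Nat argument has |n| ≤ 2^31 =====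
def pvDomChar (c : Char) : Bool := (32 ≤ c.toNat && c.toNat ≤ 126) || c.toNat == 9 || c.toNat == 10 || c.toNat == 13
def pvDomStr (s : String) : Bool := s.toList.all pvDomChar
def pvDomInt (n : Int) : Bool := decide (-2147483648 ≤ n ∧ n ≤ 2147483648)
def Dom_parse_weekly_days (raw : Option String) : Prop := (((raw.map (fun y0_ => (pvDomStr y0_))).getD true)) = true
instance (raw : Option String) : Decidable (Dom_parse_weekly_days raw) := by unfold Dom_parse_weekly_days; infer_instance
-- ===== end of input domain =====

-- B inverts the loops: it scans the fixed weekday domain 0..6 in order and for each candidate searches the comma tokens for one parsing to it — no list/set accumulator and no sort (alternative decomposition, same behaviour).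

-- ===== PORT A =====
def parse_weekly_days (raw : Option String) : List Int :=
  match raw with
  | none => []
  | some s =>
    if s = "" then []
    else
      -- raw.split(",") : sep is the non-empty literal ",", so split? is always `some`
      let parts := ((((PySem.Str.split? s ",").getD []).map PySem.Str.strip)).filter (fun p => p ≠ "")
      let days := parts.foldl (fun days part =>
        match PySem.Int.ofStr? part with
        | none => days
        | some day_idx =>
          if 0 ≤ day_idx ∧ day_idx ≤ 6 then days ++ [day_idx] else days) []
      PySem.List.sorted (PySem.Set.ofList days) (fun x => x) false

-- ===== PORT B =====
-- _parses_to(tok, d): int(tok.strip()) == d, False on ValueError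
def pvParsesTo (tok : String) (d : Int) : Bool :=
  match PySem.Int.ofStr? (PySem.Str.strip tok) with
  | none => false
  | some v => v == d

def parse_weekly_days_alt (raw : Option String) : List Int :=
  match raw with
  | none => []
  | some s =>
    if s = "" then []
    else
      let tokens := (PySem.Str.split? s ",").getD []
      (PySem.List.pyRange 0 7 1).filter (fun d => tokens.any (fun tok => pvParsesTo tok d))

-- ===== PRECONDITION & SPEC =====
def Spec_parse_weekly_days (raw : Option String) (out : List Int) : Prop := out = parse_weekly_days_alt raw
instance (raw : Option String) (out : List Int) : Decidable (Spec_parse_weekly_days raw out) := by unfold Spec_parse_weekly_days; infer_instance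

-- ===== CLAIM (what is proved, stated in full; the proofs are below) =====
def Claim_equal_parse_weekly_days : Prop := ∀ (raw : Option String), Dom_parse_weekly_days raw → Spec_parse_weekly_days raw (parse_weekly_days raw)

-- ===== LEMMAS AND PROOFS =====

-- the shared "this piece of the split contributes day d" condition
def pvCond (part : String) (d : Int) : Prop :=
  PySem.Int.ofStr? (PySem.Str.strip part) = some d ∧ 0 ≤ d ∧ d ≤ 6

theorem ofStr?_empty : PySem.Int.ofStr? "" = none := by decide

-- membership in A's accumulated days list
theorem memA (l : List String) (acc : List Int) (d : Int) :
    d ∈ l.foldl (fun days part =>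
        match PySem.Int.ofStr? part with
        | none => days
        | some day_idx =>
          if 0 ≤ day_idx ∧ day_idx ≤ 6 then days ++ [day_idx] else days) acc
      ↔ d ∈ acc ∨ ∃ p ∈ l, PySem.Int.ofStr? p = some d ∧ 0 ≤ d ∧ d ≤ 6 := by
  induction l generalizing acc with
  | nil => simp
  | cons p t ih =>
    simp only [List.foldl_cons, ih, List.mem_cons]
    cases h : PySem.Int.ofStr? p with
    | none =>
      constructor
      · rintro (ha | ⟨q, hq, hc⟩)
        · exact Or.inl ha
        · exact Or.inr ⟨q, Or.inr hq, hc⟩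
      · rintro (ha | ⟨q, (rfl | hq), hc⟩)
        · exact Or.inl ha
        · rw [h] at hc; exact absurd hc.1 (by simp)
        · exact Or.inr ⟨q, hq, hc⟩
    | some v =>
      by_cases hv : 0 ≤ v ∧ v ≤ 6
      · simp only [if_pos hv]
        constructor
        · rintro (ha | ⟨q, hq, hc⟩)
          · rcases List.mem_append.mp ha with ha | ha
            · exact Or.inl ha
            · simp only [List.mem_singleton] at ha
              subst ha
              exact Or.inr ⟨p, Or.inl rfl, h, hv⟩
          · exact Or.inr ⟨q, Or.inr hq, hc⟩
        · rintro (ha | ⟨q, (rfl | hq), hc⟩)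
          · exact Or.inl (List.mem_append.mpr (Or.inl ha))
          · rw [h] at hc
            obtain ⟨hc1, _⟩ := hc
            cases hc1
            exact Or.inl (List.mem_append.mpr (Or.inr (by simp)))
          · exact Or.inr ⟨q, hq, hc⟩
      · simp only [if_neg hv]
        constructor
        · rintro (ha | ⟨q, hq, hc⟩)
          · exact Or.inl ha
          · exact Or.inr ⟨q, Or.inr hq, hc⟩
        · rintro (ha | ⟨q, (rfl | hq), hc⟩)
          · exact Or.inl ha
          · rw [h] at hc
            obtain ⟨hc1, hc2⟩ := hc
            cases hc1
            exact absurd hc2 hv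
          · exact Or.inr ⟨q, hq, hc⟩

-- membership through A's filter/map preprocessing reduces to pvCond over the raw split pieces
theorem memA_split (l : List String) (d : Int) :
    (∃ p ∈ (l.map PySem.Str.strip).filter (fun p => p ≠ ""),
        PySem.Int.ofStr? p = some d ∧ 0 ≤ d ∧ d ≤ 6)
      ↔ ∃ q ∈ l, pvCond q d := by
  constructor
  · rintro ⟨p, hp, hc⟩
    rw [List.mem_filter] at hp
    obtain ⟨hp1, _⟩ := hp
    obtain ⟨q, hq, rfl⟩ := List.mem_map.mp hp1
    exact ⟨q, hq, hc.1, hc.2⟩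
  · rintro ⟨q, hq, hc⟩
    unfold pvCond at hc
    have hne : PySem.Str.strip q ≠ "" := by
      intro hcontra
      rw [hcontra, ofStr?_empty] at hc
      exact absurd hc.1 (by simp)
    refine ⟨PySem.Str.strip q, ?_, hc.1, hc.2⟩
    rw [List.mem_filter]
    exact ⟨List.mem_map.mpr ⟨q, hq, rfl⟩, by simpa using hne⟩

-- B's inner token search succeeds iff some token satisfies pvCond (given d in the scanned range)
theorem anyB (l : List String) (d : Int) (h0 : 0 ≤ d) (h6 : d ≤ 6) :
    (l.any (fun tok => pvParsesTo tok d)) = true ↔ ∃ q ∈ l, pvCond q d := by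
  rw [List.any_eq_true]
  constructor
  · rintro ⟨tok, htok, hp⟩
    unfold pvParsesTo at hp
    cases h : PySem.Int.ofStr? (PySem.Str.strip tok) with
    | none => rw [h] at hp; simp at hp
    | some v =>
      rw [h] at hp
      have : v = d := by simpa using hp
      subst this
      exact ⟨tok, htok, h, h0, h6⟩
  · rintro ⟨q, hq, hc⟩
    refine ⟨q, hq, ?_⟩
    unfold pvParsesTo
    rw [hc.1]
    simp

-- two strictly increasing Int lists with the same members are equal
theorem eq_of_sorted_lt_of_mem_iff (xs ys : List Int)
    (hx : xs.Pairwise (· < ·)) (hy : ys.Pairwise (· < ·))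
    (hm : ∀ d, d ∈ xs ↔ d ∈ ys) : xs = ys := by
  have hxn : xs.Nodup := hx.imp (fun h => ne_of_lt h)
  have hyn : ys.Nodup := hy.imp (fun h => ne_of_lt h)
  have hperm : xs.Perm ys := (List.perm_ext_iff_of_nodup hxn hyn).mpr hm
  exact hperm.eq_of_sortedLE ((hx.imp le_of_lt).sortedLE) ((hy.imp le_of_lt).sortedLE)

-- ===== VERDICT (by name: the statement is the Claim_ definition above) =====
theorem parse_weekly_days_spec : Claim_equal_parse_weekly_days := by
  unfold Claim_equal_parse_weekly_days Spec_parse_weekly_days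
  intro raw _
  cases raw with
  | none => rfl
  | some s =>
    unfold parse_weekly_days parse_weekly_days_alt
    by_cases hs : s = ""
    · simp [hs]
    · simp only [if_neg hs]
      apply eq_of_sorted_lt_of_mem_iff
      · exact PySem.List.sorted_ofList_pairwise_lt _
      · exact List.Pairwise.filter _ (by decide : (PySem.List.pyRange 0 7 1).Pairwise (· < ·))
      · intro d
        rw [PySem.List.mem_sorted, PySem.Set.mem_ofList, memA, memA_split, List.mem_filter]
        have hrange : PySem.List.pyRange 0 7 1 = [0, 1, 2, 3, 4, 5, 6] := by decide
        rw [hrange]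
        constructor
        · rintro (h | ⟨q, hq, hc⟩)
          · simp at h
          · obtain ⟨h0, h6⟩ := hc.2
            refine ⟨by simp; omega, ?_⟩
            exact (anyB _ d h0 h6).mpr ⟨q, hq, hc⟩
        · rintro ⟨hd, hany⟩
          have hd' : 0 ≤ d ∧ d ≤ 6 := by
            simp only [List.mem_cons, List.not_mem_nil, or_false] at hd
            rcases hd with rfl|rfl|rfl|rfl|rfl|rfl|rfl <;> omega
          exact Or.inr ((anyB _ d hd'.1 hd'.2).mp hany)
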